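-- pv_equiv track=rewrite | github.com/ptro-development/trader | trader/libs/utils.py | close_index
-- ===== SOURCE A (Python) =====
-- def close_index(index, indexes, window_size=10):
--     not_allowed = [index - i for i in range(1, window_size)]
--     not_allowed.extend([index + i for i in range(1, window_size)])
--     found = False
--     for na in not_allowed:
--         if na in indexes:
--             found = True
--             break
--     return found
-- ===== SOURCE B (Python) =====
-- def close_index(index, indexes, window_size=10):
--     # One pass over the collection: an element is "close" iff its offset from
--     # index is a nonzero integer with absolute value below window_size.
--     return any(i != index and -window_size < i - index < window_size for i in indexes)
-- ===== Notes on version B (the rewrite author's own statement) =====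
-- stated objective: simpler
-- what changed: Instead of materialising the 2*(window_size-1) candidate values and scanning the collection for each, B makes a single pass over the collection and tests each element's offset from index with an inequality.
import Mathlib
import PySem

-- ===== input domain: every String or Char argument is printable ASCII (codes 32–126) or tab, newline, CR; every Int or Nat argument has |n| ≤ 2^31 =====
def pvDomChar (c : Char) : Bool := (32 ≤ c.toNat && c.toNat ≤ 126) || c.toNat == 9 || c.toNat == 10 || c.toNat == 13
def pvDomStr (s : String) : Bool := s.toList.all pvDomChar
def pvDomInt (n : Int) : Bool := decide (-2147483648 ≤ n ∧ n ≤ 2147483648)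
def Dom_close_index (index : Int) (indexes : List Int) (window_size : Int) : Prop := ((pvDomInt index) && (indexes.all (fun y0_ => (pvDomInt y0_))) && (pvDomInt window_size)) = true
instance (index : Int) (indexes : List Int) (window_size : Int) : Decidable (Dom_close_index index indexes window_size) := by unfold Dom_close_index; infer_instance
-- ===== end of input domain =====

-- B replaces A's candidate-list generation plus repeated membership scans by a single
-- inequality-testing pass over the collection (simpler; O(n) instead of O(window_size*n)).

-- ===== PORT A =====
-- the 'for na in not_allowed: if na in indexes: found = True; break' loop, step for step
def close_index_loop (indexes : List Int) : List Int → Bool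
  | [] => false
  | na :: rest => if na ∈ indexes then true else close_index_loop indexes rest

def close_index (index : Int) (indexes : List Int) (window_size : Int) : Bool :=
  let not_allowed := (PySem.List.pyRange 1 window_size 1).map (fun i => index - i)
                  ++ (PySem.List.pyRange 1 window_size 1).map (fun i => index + i)
  close_index_loop indexes not_allowed

-- ===== PORT B =====
def close_index_alt (index : Int) (indexes : List Int) (window_size : Int) : Bool :=
  indexes.any (fun i =>
    decide (i ≠ index) && decide (-window_size < i - index) && decide (i - index < window_size))

-- ===== PRECONDITION & SPEC =====
def Spec_close_index (index : Int) (indexes : List Int) (window_size : Int) (out : Bool) : Prop := out = close_index_alt index indexes window_size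
instance (index : Int) (indexes : List Int) (window_size : Int) (out : Bool) : Decidable (Spec_close_index index indexes window_size out) := by unfold Spec_close_index; infer_instance

-- ===== CLAIM (what is proved, stated in full; the proofs are below) =====
def Claim_equal_close_index : Prop := ∀ (index : Int) (indexes : List Int) (window_size : Int), Dom_close_index index indexes window_size → Spec_close_index index indexes window_size (close_index index indexes window_size)

-- ===== LEMMAS AND PROOFS =====

theorem close_index_loop_eq_any (indexes : List Int) (l : List Int) :
    close_index_loop indexes l = l.any (fun na => decide (na ∈ indexes)) := by
  induction l with
  | nil => rfl
  | cons na rest ih =>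
      simp only [close_index_loop, List.any_cons, ih]
      by_cases h : na ∈ indexes <;> simp [h]

theorem close_index_eq (index : Int) (indexes : List Int) (window_size : Int) :
    close_index index indexes window_size = close_index_alt index indexes window_size := by
  rw [Bool.eq_iff_iff]
  simp only [close_index, close_index_alt, close_index_loop_eq_any, List.any_eq_true,
    List.mem_append, List.mem_map, PySem.List.mem_pyRange_one, decide_eq_true_eq,
    Bool.and_eq_true]
  constructor
  · rintro ⟨na, ⟨d, ⟨hd1, hd2⟩, rfl⟩ | ⟨d, ⟨hd1, hd2⟩, rfl⟩, hmem⟩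
    · exact ⟨index - d, hmem, ⟨by omega, by omega⟩, by omega⟩
    · exact ⟨index + d, hmem, ⟨by omega, by omega⟩, by omega⟩
  · rintro ⟨i, hi, ⟨hne, hlo⟩, hhi⟩
    rcases lt_or_gt_of_ne hne with h | h
    · exact ⟨i, Or.inl ⟨index - i, ⟨by omega, by omega⟩, by omega⟩, hi⟩
    · exact ⟨i, Or.inr ⟨i - index, ⟨by omega, by omega⟩, by omega⟩, hi⟩

-- ===== VERDICT (by name: the statement is the Claim_ definition above) =====
theorem close_index_spec : Claim_equal_close_index := by
  intro index indexes window_size _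
  exact close_index_eq index indexes window_size
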